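-- pv_equiv track=rewrite | github.com/DAMBALDAR/UrbanHomework | module_2_hard.py | find_couples
-- ===== SOURCE A (Python) =====
-- def find_couples(number):
--     couples = []
--     for i in range(1, number +1):
--         for j in range(1, i + 1):
--             if (i + j) % number == 0 and i != j:
--                 couples.insert(0, i)
--                 couples.insert(0, j)
--     return couples
-- ===== SOURCE B (Python) =====
-- def find_couples(number):
--     # i + j with 1 <= j < i <= number is divisible by number exactly when i + j == number,
--     # i.e. j = number - i with number // 2 < i <= number - 1; A prepends pairs, so emit i descending.
--     res = []
--     for i in range(number - 1, number // 2, -1):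
--         res.append(number - i)
--         res.append(i)
--     return res
-- ===== Notes on version B (the rewrite author's own statement) =====
-- stated objective: faster
-- what changed: Replaced the O(n^2) double scan with a closed-form enumeration: the only solutions of (i+j) % n == 0 with 1 <= j <= i <= n, i != j are j = n - i for n//2 < i < n, so B emits them directly in one descending pass.
import Mathlib
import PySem

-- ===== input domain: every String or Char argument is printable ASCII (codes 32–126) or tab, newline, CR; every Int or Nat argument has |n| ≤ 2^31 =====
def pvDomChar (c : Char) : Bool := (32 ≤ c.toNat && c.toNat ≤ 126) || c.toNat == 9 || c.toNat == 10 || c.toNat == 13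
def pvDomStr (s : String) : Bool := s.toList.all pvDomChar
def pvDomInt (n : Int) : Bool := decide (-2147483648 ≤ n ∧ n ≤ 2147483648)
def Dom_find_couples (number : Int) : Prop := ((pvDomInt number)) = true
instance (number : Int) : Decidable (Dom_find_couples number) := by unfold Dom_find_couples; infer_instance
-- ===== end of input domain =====

-- B replaces A's O(n^2) double scan by directly emitting the only solutions j = number - i
-- for number//2 < i <= number - 1, in one descending pass (objective: faster, asymptotic).

-- ===== PORT A =====
def find_couples (number : Int) : List Int :=
  (PySem.List.pyRange 1 (number + 1) 1).foldl (fun couples i =>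
    (PySem.List.pyRange 1 (i + 1) 1).foldl (fun couples j =>
      if PySem.Int.mod (i + j) number = 0 ∧ i ≠ j then
        j :: i :: couples          -- couples.insert(0, i); couples.insert(0, j)
      else couples) couples) []

-- ===== PORT B =====
def find_couples_alt (number : Int) : List Int :=
  (PySem.List.pyRange (number - 1) (PySem.Int.floordiv number 2) (-1)).foldl
    (fun res i => (res ++ [number - i]) ++ [i]) []

-- ===== PRECONDITION & SPEC =====
def Spec_find_couples (number : Int) (out : List Int) : Prop := out = find_couples_alt number
instance (number : Int) (out : List Int) : Decidable (Spec_find_couples number out) := by unfold Spec_find_couples; infer_instance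

-- ===== CLAIM (what is proved, stated in full; the proofs are below) =====
def Claim_equal_find_couples : Prop := ∀ (number : Int), Dom_find_couples number → Spec_find_couples number (find_couples number)

-- ===== LEMMAS AND PROOFS =====

-- A positive multiple of n that is at most 2n is n or 2n.
lemma pv_dvd_cases (n m : Int) (hn : 1 ≤ n) (h1 : 0 < m) (h2 : m ≤ 2 * n) (hd : n ∣ m) :
    m = n ∨ m = 2 * n := by
  obtain ⟨k, hk⟩ := hd
  have hk1 : 1 ≤ k := by nlinarith
  have hk2 : k ≤ 2 := by nlinarith
  have : k = 1 ∨ k = 2 := by omega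
  rcases this with h | h <;> [left; right] <;> subst h <;> subst hk <;> ring

-- A's inner loop leaves the accumulator unchanged when no j in the range fires the test.
lemma pv_foldl_no_hit (n i : Int) (L : List Int) (acc : List Int)
    (h : ∀ j ∈ L, ¬ (PySem.Int.mod (i + j) n = 0 ∧ i ≠ j)) :
    L.foldl (fun couples j => if PySem.Int.mod (i + j) n = 0 ∧ i ≠ j then
        j :: i :: couples else couples) acc = acc := by
  induction L generalizing acc with
  | nil => rfl
  | cons x L ih =>
      simp only [List.foldl_cons]
      rw [if_neg (h x (by simp))]
      exact ih acc (fun j hj => h j (by simp [hj]))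

-- A's inner loop for a given i prepends [n-i, i] exactly when n < 2i and i ≤ n-1.
lemma pv_inner_eq (n i : Int) (hn : 1 ≤ n) (hi1 : 1 ≤ i) (hin : i ≤ n) (acc : List Int) :
    (PySem.List.pyRange 1 (i + 1) 1).foldl (fun couples j =>
      if PySem.Int.mod (i + j) n = 0 ∧ i ≠ j then j :: i :: couples else couples) acc
    = if n < 2 * i ∧ i ≤ n - 1 then (n - i) :: i :: acc else acc := by
  by_cases hc : n < 2 * i ∧ i ≤ n - 1
  · rw [if_pos hc]
    have hj0 : 1 ≤ n - i := by omega
    have hji : n - i < i := by omega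
    rw [PySem.List.pyRange_one_append 1 (n - i) (i + 1) (by omega) (by omega),
        List.foldl_append,
        pv_foldl_no_hit n i _ acc (by
          intro j hj ⟨hm, _⟩
          rw [PySem.Int.mod_eq_zero_iff_dvd] at hm
          rw [PySem.List.mem_pyRange_one] at hj
          have := Int.le_of_dvd (by omega) hm
          omega),
        PySem.List.pyRange_one_cons (by omega), List.foldl_cons,
        if_pos ⟨by rw [PySem.Int.mod_eq_zero_iff_dvd]; exact ⟨1, by ring⟩, by omega⟩]
    exact pv_foldl_no_hit n i _ _ (by
      intro j hj ⟨hm, hne⟩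
      rw [PySem.Int.mod_eq_zero_iff_dvd] at hm
      rw [PySem.List.mem_pyRange_one] at hj
      rcases pv_dvd_cases n (i + j) hn (by omega) (by omega) hm with h | h <;> omega)
  · rw [if_neg hc]
    exact pv_foldl_no_hit n i _ acc (by
      intro j hj ⟨hm, hne⟩
      rw [PySem.Int.mod_eq_zero_iff_dvd] at hm
      rw [PySem.List.mem_pyRange_one] at hj
      rcases pv_dvd_cases n (i + j) hn (by omega) (by omega) hm with h | h <;> omega)

-- The outer loop up to m builds exactly the blocks [n-i, i] for i descending from min m (n-1) to n//2+1.
lemma pv_outer_eq (n : Int) (hn : 1 ≤ n) (m : Nat) (hm : (m : Int) ≤ n) :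
    (PySem.List.pyRange 1 ((m : Int) + 1) 1).foldl (fun couples i =>
      (PySem.List.pyRange 1 (i + 1) 1).foldl (fun couples j =>
        if PySem.Int.mod (i + j) n = 0 ∧ i ≠ j then j :: i :: couples else couples) couples) []
    = (PySem.List.pyRange (min (m : Int) (n - 1)) (PySem.Int.floordiv n 2) (-1)).flatMap
        (fun i => [n - i, i]) := by
  induction m with
  | zero =>
      rw [PySem.List.pyRange_one_eq_nil (by omega)]
      have h0 : (0 : Int) ≤ PySem.Int.floordiv n 2 := by
        rw [PySem.Int.le_floordiv_iff_mul_le (by omega)]; omega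
      rw [show min ((0 : Nat) : Int) (n - 1) = 0 by omega,
          PySem.List.pyRange_neg_one_eq_nil h0]
      rfl
  | succ m ih =>
      have hm' : (m : Int) ≤ n := by push_cast at hm ⊢; omega
      rw [show (((m + 1 : Nat)) : Int) + 1 = ((m : Int) + 1) + 1 by push_cast; ring,
          PySem.List.pyRange_one_succ_right (by omega), List.foldl_append, ih hm',
          List.foldl_cons, List.foldl_nil,
          pv_inner_eq n ((m : Int) + 1) hn (by omega) (by push_cast at hm; omega)]
      by_cases hc : n < 2 * ((m : Int) + 1) ∧ (m : Int) + 1 ≤ n - 1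
      · rw [if_pos hc]
        have hfd : PySem.Int.floordiv n 2 < (m : Int) + 1 := by
          rw [PySem.Int.floordiv_lt_iff_lt_mul (by omega)]; omega
        rw [show min (((m + 1 : Nat)) : Int) (n - 1) = (m : Int) + 1 by push_cast; omega,
            show min ((m : Int)) (n - 1) = (m : Int) by omega]
        conv_rhs => rw [PySem.List.pyRange_neg_one_cons hfd]
        simp
      · rw [if_neg hc]
        by_cases hle : (m : Int) + 1 ≤ n - 1
        · have hge : (m : Int) + 1 ≤ PySem.Int.floordiv n 2 := by
            rw [PySem.Int.le_floordiv_iff_mul_le (by omega)]; omega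
          rw [show min (((m + 1 : Nat)) : Int) (n - 1) = (m : Int) + 1 by push_cast; omega,
              show min ((m : Int)) (n - 1) = (m : Int) by omega,
              PySem.List.pyRange_neg_one_eq_nil (by omega),
              PySem.List.pyRange_neg_one_eq_nil (by omega)]
        · rw [show min (((m + 1 : Nat)) : Int) (n - 1) = n - 1 by push_cast; omega,
              show min ((m : Int)) (n - 1) = n - 1 by omega]

-- B's fold is the same flatMap.
lemma pv_alt_eq (n : Int) :
    find_couples_alt n
    = (PySem.List.pyRange (n - 1) (PySem.Int.floordiv n 2) (-1)).flatMap
        (fun i => [n - i, i]) := by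
  unfold find_couples_alt
  rw [PySem.List.foldl_congr_mem _ _ (fun res i => res ++ [n - i, i]) _
        (by intro acc x _; simp),
      PySem.List.foldl_append_eq_flatMap]
  simp

-- ===== VERDICT (by name: the statement is the Claim_ definition above) =====
theorem find_couples_spec : Claim_equal_find_couples := by
  intro n _
  unfold Spec_find_couples find_couples
  rw [pv_alt_eq]
  by_cases hn : 1 ≤ n
  · have := pv_outer_eq n hn n.toNat (by omega)
    rw [show ((n.toNat : Int)) = n by omega] at this
    rw [this, show min n (n - 1) = n - 1 by omega]
  · rw [PySem.List.pyRange_one_eq_nil (by omega)]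
    have : n - 1 ≤ PySem.Int.floordiv n 2 := by
      rw [PySem.Int.le_floordiv_iff_mul_le (by omega)]; omega
    rw [PySem.List.pyRange_neg_one_eq_nil this]
    rfl
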